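-- pv_equiv track=rewrite | github.com/dbigman/bptk_py_tutorial | engine/run.py | _parse_issue_string
-- ===== SOURCE A (Python) =====
-- from typing import Any, Dict, List, Optional
--
-- def _parse_issue_string(s: str) -> Dict[str, Optional[str]]:
--     """
--     Parse an issue string of the form:
--       "file:{name},row:{row},column:{col},message:{text}"
--     into a dict { "file": name, "row": row, "column": col, "message": text }.
--     Returns None for missing parts.
--     """
--     parts: Dict[str, Optional[str]] = {"file": None, "row": None, "column": None, "message": None}
--     try:
--         for part in s.split(","):
--             if ":" in part:
--                 k, v = part.split(":", 1)
--                 k = k.strip()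
--                 v = v.strip()
--                 if k in parts:
--                     parts[k] = v
--     except Exception:
--         # best-effort: return message under 'message'
--         parts["message"] = s
--     return parts
-- ===== SOURCE B (Python) =====
-- from typing import Dict, Optional
--
-- FIELDS = ("file", "row", "column", "message")
--
--
-- def _parse_issue_string(s: str) -> Dict[str, Optional[str]]:
--     """
--     Parse "file:{name},row:{row},column:{col},message:{text}" into
--     { "file": ..., "row": ..., "column": ..., "message": ... } (None for missing).
--     """
--     try:
--         parts = s.split(",")
--     except Exception:
--         return {"file": None, "row": None, "column": None, "message": s}
--
--     def last_value(key):
--         # scan the parts back-to-front; the first hit is the last occurrence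
--         for part in reversed(parts):
--             if ":" in part:
--                 k, v = part.split(":", 1)
--                 if k.strip() == key:
--                     return v.strip()
--         return None
--
--     return {key: last_value(key) for key in FIELDS}
-- ===== Notes on version B (the rewrite author's own statement) =====
-- stated objective: alternative
-- what changed: B keeps no dict at all: for each of the four fixed fields it scans the comma-split parts back-to-front and takes the first (i.e. last) part whose stripped key matches, instead of A's single forward pass mutating a pre-seeded dict behind a key-membership guard.
import Mathlib
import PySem

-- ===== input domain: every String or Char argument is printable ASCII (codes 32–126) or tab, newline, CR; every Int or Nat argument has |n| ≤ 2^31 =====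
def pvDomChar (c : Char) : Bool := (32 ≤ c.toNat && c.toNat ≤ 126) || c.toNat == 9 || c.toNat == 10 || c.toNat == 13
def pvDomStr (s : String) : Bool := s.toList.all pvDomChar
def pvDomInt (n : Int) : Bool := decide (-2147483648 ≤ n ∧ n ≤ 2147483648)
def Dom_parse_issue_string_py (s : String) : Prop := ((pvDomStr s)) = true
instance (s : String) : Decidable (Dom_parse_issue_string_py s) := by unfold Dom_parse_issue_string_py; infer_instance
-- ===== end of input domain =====

-- B keeps no dict: each of the four fixed fields is found by its own back-to-front scan of the
-- comma-split parts (first hit = last occurrence), instead of A's forward pass mutating a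
-- pre-seeded dict (objective: alternative). A's try/except is unreachable for a string argument.

-- ===== PORT A =====
-- loop body of A's 'for part in s.split(",")' (mutates the pre-seeded four-key dict in place)
def pvStepA (d : PySem.Dict String (Option String)) (part : String) :
    PySem.Dict String (Option String) :=
  if PySem.Str.isIn ":" part then
    match PySem.Str.splitMax? part ":" 1 with
    | some (k :: v :: []) =>
        let k := PySem.Str.strip k
        let v := PySem.Str.strip v
        if d.contains k then d.insert k (some v) else d
    | _ => d   -- unreachable: ":" in part gives exactly two pieces
  else d

def parse_issue_string_py (s : String) : List (String × Option String) :=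
  (((PySem.Str.split? s ",").getD []).foldl pvStepA
    (PySem.Dict.ofList
      [("file", (none : Option String)), ("row", none), ("column", none), ("message", none)])).items

-- ===== PORT B =====
-- B's 'last_value(key)': first match in the reversed parts list
def pvLastValue (key : String) : List String → Option String
  | [] => none
  | p :: t =>
    if PySem.Str.isIn ":" p then
      match PySem.Str.splitMax? p ":" 1 with
      | some (k :: v :: []) =>
          if PySem.Str.strip k = key then some (PySem.Str.strip v) else pvLastValue key t
      | _ => pvLastValue key t   -- unreachable: ":" in p gives exactly two pieces
    else pvLastValue key t

def parse_issue_string_py_alt (s : String) : List (String × Option String) :=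
  let rev := ((PySem.Str.split? s ",").getD []).reverse
  [("file", pvLastValue "file" rev), ("row", pvLastValue "row" rev),
   ("column", pvLastValue "column" rev), ("message", pvLastValue "message" rev)]

-- ===== PRECONDITION & SPEC =====
def Spec_parse_issue_string_py (s : String) (out : List (String × Option String)) : Prop := out = parse_issue_string_py_alt s
instance (s : String) (out : List (String × Option String)) : Decidable (Spec_parse_issue_string_py s out) := by unfold Spec_parse_issue_string_py; infer_instance

-- ===== CLAIM (what is proved, stated in full; the proofs are below) =====
def Claim_equal_parse_issue_string_py : Prop := ∀ (s : String), Dom_parse_issue_string_py s → Spec_parse_issue_string_py s (parse_issue_string_py s)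

-- ===== LEMMAS AND PROOFS =====

-- A's four-key dict state, parameterised by the value at each of the four keys
def pvShape (f : String → Option String) : PySem.Dict String (Option String) :=
  PySem.Dict.mk
    [("file", f "file"), ("row", f "row"), ("column", f "column"), ("message", f "message")]

-- one step of A, read off as an update of the shape function
theorem pvStep_shape (f : String → Option String) (p : String) :
    pvStepA (pvShape f) p
      = pvShape (fun k => match pvLastValue k [p] with | some v => some v | none => f k) := by
  unfold pvStepA
  by_cases h : PySem.Str.isIn ":" p = true
  · have hch : PySem.Chars.isIn [':'] p.toList = true := by simpa [PySem.Str.isIn] using h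
    simp only [h, if_true]
    rcases hs : PySem.Str.splitMax? p ":" 1 with _ | ⟨_ | ⟨k, _ | ⟨v, _ | ⟨w, t⟩⟩⟩⟩
    · apply PySem.Dict.ext; simp [pvShape, pvLastValue, hch, hs]
    · apply PySem.Dict.ext; simp [pvShape, pvLastValue, hch, hs]
    · apply PySem.Dict.ext; simp [pvShape, pvLastValue, hch, hs]
    · by_cases h1 : PySem.Str.strip k = "file"
      · apply PySem.Dict.ext
        simp [pvShape, pvLastValue, hch, hs, h1, PySem.Dict.items_insert]
      · by_cases h2 : PySem.Str.strip k = "row"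
        · apply PySem.Dict.ext
          simp [pvShape, pvLastValue, hch, hs, h2, PySem.Dict.items_insert]
        · by_cases h3 : PySem.Str.strip k = "column"
          · apply PySem.Dict.ext
            simp [pvShape, pvLastValue, hch, hs, h3, PySem.Dict.items_insert]
          · by_cases h4 : PySem.Str.strip k = "message"
            · apply PySem.Dict.ext
              simp [pvShape, pvLastValue, hch, hs, h4, PySem.Dict.items_insert]
            · have hn1 : "file" ≠ PySem.Str.strip k := fun hh => h1 hh.symm
              have hn2 : "row" ≠ PySem.Str.strip k := fun hh => h2 hh.symm
              have hn3 : "column" ≠ PySem.Str.strip k := fun hh => h3 hh.symm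
              have hn4 : "message" ≠ PySem.Str.strip k := fun hh => h4 hh.symm
              apply PySem.Dict.ext
              simp [pvShape, pvLastValue, hch, hs, h1, h2, h3, h4, hn1, hn2, hn3, hn4]
    · apply PySem.Dict.ext; simp [pvShape, pvLastValue, hch, hs]
  · simp only [Bool.not_eq_true] at h
    have hch : PySem.Chars.isIn [':'] p.toList = false := by simpa [PySem.Str.isIn] using h
    apply PySem.Dict.ext
    simp [pvShape, pvLastValue, hch]

-- prepending a part to the reversed list = resolving it first
theorem pvLastValue_cons_or (k p : String) (r : List String) (d : Option String) :
    (match pvLastValue k (p :: r) with | some v => some v | none => d)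
      = (match pvLastValue k [p] with
         | some v => some v
         | none => match pvLastValue k r with | some v => some v | none => d) := by
  by_cases h : PySem.Str.isIn ":" p = true
  · have hch : PySem.Chars.isIn [':'] p.toList = true := by simpa [PySem.Str.isIn] using h
    rcases hs : PySem.Str.splitMax? p ":" 1 with _ | ⟨_ | ⟨k', _ | ⟨v, _ | ⟨w, t⟩⟩⟩⟩ <;>
      try simp [pvLastValue, hch, hs]
    by_cases he : PySem.Str.strip k' = k <;> simp [he]
  · simp only [Bool.not_eq_true] at h
    have hch : PySem.Chars.isIn [':'] p.toList = false := by simpa [PySem.Str.isIn] using h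
    simp [pvLastValue, hch]

-- the whole loop, by induction from the back of the parts list
theorem pvLoop_shape (ps : List String) (f : String → Option String) :
    ps.foldl pvStepA (pvShape f)
      = pvShape (fun k => match pvLastValue k ps.reverse with | some v => some v | none => f k) := by
  induction ps using List.reverseRecOn generalizing f with
  | nil => rfl
  | append_singleton qs p ih =>
    rw [List.foldl_append, List.foldl_cons, List.foldl_nil, ih, pvStep_shape,
        List.reverse_append]
    simp only [List.reverse_singleton, List.singleton_append]
    congr 1
    funext k
    exact (pvLastValue_cons_or k p qs.reverse (f k)).symm

-- ===== VERDICT (by name: the statement is the Claim_ definition above) =====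
theorem parse_issue_string_py_spec : Claim_equal_parse_issue_string_py := by
  intro s _
  unfold Spec_parse_issue_string_py parse_issue_string_py parse_issue_string_py_alt
  have hinit :
      PySem.Dict.ofList
        [("file", (none : Option String)), ("row", none), ("column", none), ("message", none)]
        = pvShape (fun _ => none) := by rfl
  rw [hinit, pvLoop_shape]
  cases hm : pvLastValue "file" ((PySem.Str.split? s ",").getD []).reverse <;>
  cases hr : pvLastValue "row" ((PySem.Str.split? s ",").getD []).reverse <;>
  cases hc : pvLastValue "column" ((PySem.Str.split? s ",").getD []).reverse <;>
  cases hg : pvLastValue "message" ((PySem.Str.split? s ",").getD []).reverse <;>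
    simp [pvShape, hm, hr, hc, hg]
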